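-- pv_equiv track=rewrite | github.com/kostas40kis/PatchOps | patchops/bundles/shape_validation.py | _collect_zip_launcher_paths
-- ===== SOURCE A (Python) =====
-- ROOT_LAUNCHER_NAME = "run_with_patchops.ps1"
--
-- LEGACY_LAUNCHER_PATHS = (
--     "launchers/apply_with_patchops.ps1",
--     "launchers/verify_with_patchops.ps1",
-- )
--
-- def _allowed_launcher_paths(root_folder_name: str | None = None) -> tuple[str, ...]:
--     if root_folder_name is None:
--         return (ROOT_LAUNCHER_NAME, *LEGACY_LAUNCHER_PATHS)
--     return (
--         f"{root_folder_name}/{ROOT_LAUNCHER_NAME}",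
--         *(f"{root_folder_name}/{item}" for item in LEGACY_LAUNCHER_PATHS),
--     )
--
-- def _is_content_file(normalized_path: str, *, root_folder_name: str | None = None) -> bool:
--     prefix = "content/"
--     if root_folder_name:
--         prefix = f"{root_folder_name}/content/"
--     return normalized_path.startswith(prefix)
--
-- def _collect_zip_launcher_paths(member_names: list[str], root_folder_name: str) -> tuple[list[str], list[str]]:
--     allowed = set(_allowed_launcher_paths(root_folder_name))
--     launcher_paths = sorted(path for path in member_names if path in allowed)
--
--     misplaced = sorted(
--         path
--         for path in member_names
--         if path.lower().endswith(".ps1")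
--         and not _is_content_file(path, root_folder_name=root_folder_name)
--         and path not in allowed
--     )
--     return launcher_paths, misplaced
-- ===== SOURCE B (Python) =====
-- ROOT_LAUNCHER_NAME = "run_with_patchops.ps1"
--
-- LEGACY_LAUNCHER_PATHS = (
--     "launchers/apply_with_patchops.ps1",
--     "launchers/verify_with_patchops.ps1",
-- )
--
-- def _collect_zip_launcher_paths(member_names, root_folder_name):
--     # The three allowed launcher locations, in lexicographic order.
--     candidates = sorted(
--         f"{root_folder_name}/{name}"
--         for name in (ROOT_LAUNCHER_NAME, *LEGACY_LAUNCHER_PATHS)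
--     )
--     # Multiplicity of every member path (one counting pass).
--     counts = {}
--     for path in member_names:
--         counts[path] = counts.get(path, 0) + 1
--     # Already-sorted launcher list: emit each candidate as often as it occurs.
--     launcher_paths = [c for c in candidates for _ in range(counts.get(c, 0))]
--     # Already-sorted misplaced list: one scan over the sorted members.
--     prefix = f"{root_folder_name}/content/" if root_folder_name else "content/"
--     misplaced = [
--         path
--         for path in sorted(member_names)
--         if path.lower().endswith(".ps1")
--         and not path.startswith(prefix)
--         and path not in candidates
--     ]
--     return launcher_paths, misplaced
-- ===== Notes on version B (the rewrite author's own statement) =====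
-- stated objective: alternative
-- what changed: Instead of filtering member_names twice and sorting each result, B builds the launcher list directly from the three sorted allowed candidates using a multiplicity counter over member_names (no sort of member data for that half), and produces the misplaced list by a single filtering scan over the once-sorted member list (no post-sort).
import Mathlib
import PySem

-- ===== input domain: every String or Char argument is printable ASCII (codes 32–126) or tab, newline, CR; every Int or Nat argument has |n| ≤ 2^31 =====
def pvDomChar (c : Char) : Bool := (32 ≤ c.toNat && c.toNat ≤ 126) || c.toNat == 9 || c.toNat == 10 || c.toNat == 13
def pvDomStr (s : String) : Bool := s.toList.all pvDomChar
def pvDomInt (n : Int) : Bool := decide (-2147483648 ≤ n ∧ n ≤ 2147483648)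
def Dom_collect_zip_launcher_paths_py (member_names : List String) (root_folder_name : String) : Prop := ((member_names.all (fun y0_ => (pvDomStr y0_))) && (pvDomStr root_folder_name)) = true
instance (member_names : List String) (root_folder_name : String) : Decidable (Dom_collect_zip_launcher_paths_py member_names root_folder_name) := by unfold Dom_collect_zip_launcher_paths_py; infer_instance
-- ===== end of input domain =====

-- B replaces A's two filtered-and-sorted comprehensions by (1) emitting the launcher list
-- directly from the three sorted allowed candidates via a multiplicity counter over the
-- members and (2) one filtering scan over the once-sorted member list (objective: alternative).

-- ===== PORT A =====
def pvRootLauncherName : String := "run_with_patchops.ps1"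

def pvLegacyLauncherPaths : List String :=
  ["launchers/apply_with_patchops.ps1", "launchers/verify_with_patchops.ps1"]

-- _allowed_launcher_paths with root_folder_name a str (never None here)
def pvAllowedLauncherPaths (root_folder_name : String) : List String :=
  (root_folder_name ++ "/" ++ pvRootLauncherName) ::
    pvLegacyLauncherPaths.map (fun item => root_folder_name ++ "/" ++ item)

-- _is_content_file (Python truthiness: empty root keeps prefix "content/")
def pvIsContentFile (normalized_path : String) (root_folder_name : String) : Bool :=
  PySem.Str.startswith normalized_path
    (if root_folder_name ≠ "" then root_folder_name ++ "/content/" else "content/")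

def collect_zip_launcher_paths_py (member_names : List String) (root_folder_name : String) :
    List String × List String :=
  let allowed : PySem.Set String := PySem.Set.ofList (pvAllowedLauncherPaths root_folder_name)
  let launcher_paths := PySem.List.sorted
    (member_names.filter (fun path => PySem.Set.contains allowed path)) (fun x => x) false
  let misplaced := PySem.List.sorted
    (member_names.filter (fun path =>
      PySem.Str.endswith (PySem.Str.lower path) ".ps1"
        && !pvIsContentFile path root_folder_name
        && !PySem.Set.contains allowed path)) (fun x => x) false
  (launcher_paths, misplaced)

-- ===== PORT B =====
def collect_zip_launcher_paths_py_alt (member_names : List String) (root_folder_name : String) :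
    List String × List String :=
  -- candidates = sorted(f"{root}/{name}" for name in (ROOT_LAUNCHER_NAME, *LEGACY_LAUNCHER_PATHS))
  let candidates := PySem.List.sorted
    (["run_with_patchops.ps1", "launchers/apply_with_patchops.ps1",
      "launchers/verify_with_patchops.ps1"].map
        (fun name => root_folder_name ++ "/" ++ name)) (fun x => x) false
  -- counts[path] = counts.get(path, 0) + 1
  let counts := member_names.foldl
    (fun d path => PySem.Dict.insert d path (PySem.Dict.getD d path 0 + 1))
    (PySem.Dict.empty : PySem.Dict String Int)
  -- [c for c in candidates for _ in range(counts.get(c, 0))]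
  let launcher_paths := candidates.flatMap
    (fun c => (PySem.List.pyRange 0 (PySem.Dict.getD counts c 0) 1).map (fun _ => c))
  let prefix_ := if root_folder_name ≠ "" then root_folder_name ++ "/content/" else "content/"
  -- [path for path in sorted(member_names) if …]
  let misplaced := (PySem.List.sorted member_names (fun x => x) false).filter
    (fun path => PySem.Str.endswith (PySem.Str.lower path) ".ps1"
      && !PySem.Str.startswith path prefix_
      && !candidates.contains path)
  (launcher_paths, misplaced)

-- ===== PRECONDITION & SPEC =====
def Spec_collect_zip_launcher_paths_py (member_names : List String) (root_folder_name : String) (out : List String × List String) : Prop := out = collect_zip_launcher_paths_py_alt member_names root_folder_name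
instance (member_names : List String) (root_folder_name : String) (out : List String × List String) : Decidable (Spec_collect_zip_launcher_paths_py member_names root_folder_name out) := by unfold Spec_collect_zip_launcher_paths_py; infer_instance

-- ===== CLAIM (what is proved, stated in full; the proofs are below) =====
def Claim_equal_collect_zip_launcher_paths_py : Prop := ∀ (member_names : List String) (root_folder_name : String), Dom_collect_zip_launcher_paths_py member_names root_folder_name → Spec_collect_zip_launcher_paths_py member_names root_folder_name (collect_zip_launcher_paths_py member_names root_folder_name)

-- ===== LEMMAS AND PROOFS =====

-- two distinct suffixes after the same "root/" prefix give distinct strings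
theorem pv_append_ne (r s t : String) (h : PySem.Str.len s ≠ PySem.Str.len t) :
    r ++ "/" ++ s ≠ r ++ "/" ++ t := by
  intro he
  have hl := congrArg PySem.Str.len he
  simp only [PySem.Str.len_append] at hl
  omega

theorem pv_raw_nodup (r : String) : (pvAllowedLauncherPaths r).Nodup := by
  simp only [pvAllowedLauncherPaths, pvRootLauncherName, pvLegacyLauncherPaths, List.map,
    List.nodup_cons, List.mem_cons, List.not_mem_nil, List.nodup_nil]
  refine ⟨?_, ?_, ?_⟩
  · intro hmem
    rcases hmem with h | h | h
    · exact pv_append_ne r _ _ (by decide) h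
    · exact pv_append_ne r _ _ (by decide) h
    · exact h.elim
  · intro hmem
    rcases hmem with h | h
    · exact pv_append_ne r _ _ (by decide) h
    · exact h.elim
  · trivial

-- count of an element in a filtered list
theorem pv_count_filter (q : String → Bool) (a : String) (xs : List String) :
    (xs.filter q).count a = if q a then xs.count a else 0 := by
  induction xs with
  | nil => simp
  | cons x t ih =>
    rw [List.filter_cons]
    by_cases hx : q x = true
    · rw [if_pos hx, List.count_cons, List.count_cons, ih]
      by_cases hax : x = a
      · subst hax; simp [hx]
      · simp [hax]
    · rw [if_neg hx, ih, List.count_cons]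
      by_cases hax : x = a
      · subst hax; simp [hx]
      · simp [hax]

-- count of an element in the candidate-expansion list
theorem pv_count_flatMap_replicate (cands : List String) (n : String → Nat) (a : String)
    (hnd : cands.Nodup) :
    (cands.flatMap (fun c => List.replicate (n c) c)).count a
      = if a ∈ cands then n a else 0 := by
  induction cands with
  | nil => simp
  | cons c t ih =>
    rcases List.nodup_cons.mp hnd with ⟨hc, hnt⟩
    rw [List.flatMap_cons, List.count_append, ih hnt]
    by_cases hac : a = c
    · subst hac
      simp [fun h => hc h]
    · simp [List.count_replicate, hac, Ne.symm hac, List.mem_cons]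

-- expanding a strictly increasing candidate list block-wise stays weakly sorted
theorem pv_pairwise_flatMap_replicate (cands : List String) (n : String → Nat)
    (h : cands.Pairwise (· < ·)) :
    (cands.flatMap (fun c => List.replicate (n c) c)).Pairwise (· ≤ ·) := by
  induction cands with
  | nil => simp
  | cons c t ih =>
    rcases List.pairwise_cons.mp h with ⟨hct, hpt⟩
    rw [List.flatMap_cons]
    refine List.pairwise_append.mpr ⟨?_, ih hpt, ?_⟩
    · exact List.pairwise_replicate.mpr (Or.inr le_rfl)
    · intro x hx y hy
      have hxc : x = c := List.eq_of_mem_replicate hx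
      rcases List.mem_flatMap.mp hy with ⟨d, hd, hyd⟩
      have hyc : y = d := List.eq_of_mem_replicate hyd
      subst hxc
      rw [hyc]
      exact le_of_lt (hct d hd)

theorem pv_cands_nodup (r : String) :
    (PySem.List.sorted (pvAllowedLauncherPaths r) (fun x => x) false).Nodup :=
  ((PySem.List.sorted_perm (pvAllowedLauncherPaths r) (fun x => x) false).nodup_iff).mpr
    (pv_raw_nodup r)

theorem pv_cands_pairwise_lt (r : String) :
    (PySem.List.sorted (pvAllowedLauncherPaths r) (fun x => x) false).Pairwise (· < ·) := by
  have h1 := PySem.List.sorted_pairwise (xs := pvAllowedLauncherPaths r) (key := fun x => x)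
  have h2 := pv_cands_nodup r
  exact (h1.and h2).imp (fun hp => lt_of_le_of_ne hp.1 hp.2)

-- launcher half: sorted(filter-by-membership) = candidate expansion by multiplicity
theorem pv_launchers (xs : List String) (r : String) :
    PySem.List.sorted
        (xs.filter (fun p => PySem.Set.contains (PySem.Set.ofList (pvAllowedLauncherPaths r)) p))
        (fun x => x) false
      = (PySem.List.sorted (pvAllowedLauncherPaths r) (fun x => x) false).flatMap
          (fun c => List.replicate (xs.count c) c) := by
  apply PySem.List.sorted_id_eq_of_perm_of_pairwise
  · rw [List.perm_iff_count]
    intro a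
    rw [pv_count_flatMap_replicate _ _ _ (pv_cands_nodup r), pv_count_filter]
    by_cases h : a ∈ pvAllowedLauncherPaths r <;>
      simp [PySem.List.mem_sorted, h, PySem.Set.mem_ofList]
  · exact pv_pairwise_flatMap_replicate _ _ (pv_cands_pairwise_lt r)

-- misplaced half: sorting after filtering = filtering the sorted list
theorem pv_sorted_filter (q : String → Bool) (xs : List String) :
    PySem.List.sorted (xs.filter q) (fun x => x) false
      = (PySem.List.sorted xs (fun x => x) false).filter q := by
  apply PySem.List.sorted_id_eq_of_perm_of_pairwise
  · exact (PySem.List.sorted_perm xs (fun x => x) false).filter q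
  · exact (PySem.List.sorted_pairwise (xs := xs) (key := fun x => x)).filter q

-- the literal candidate list of port B is _allowed_launcher_paths
theorem pv_raw_eq (r : String) :
    (["run_with_patchops.ps1", "launchers/apply_with_patchops.ps1",
      "launchers/verify_with_patchops.ps1"].map (fun name => r ++ "/" ++ name))
      = pvAllowedLauncherPaths r := by
  simp [pvAllowedLauncherPaths, pvRootLauncherName, pvLegacyLauncherPaths]

-- B's counter lookup is the plain count
theorem pv_counts_getD (xs : List String) (c : String) :
    PySem.Dict.getD
        (xs.foldl (fun d path => PySem.Dict.insert d path (PySem.Dict.getD d path 0 + 1))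
          (PySem.Dict.empty : PySem.Dict String Int)) c 0
      = (xs.count c : Int) := by
  rw [PySem.Dict.getD_foldl_insert_add_one]
  simp

-- B's inner comprehension is replication
theorem pv_range_const (n : Nat) (c : String) :
    (PySem.List.pyRange 0 (n : Int) 1).map (fun _ => c) = List.replicate n c := by
  rw [PySem.List.pyRange_zero_natCast]
  simp [Function.comp_def, List.map_const']

-- the two membership-test predicates of the misplaced halves agree pointwise
theorem pv_pred_eq (r : String) (p : String) (pre : String) :
    (PySem.Str.endswith (PySem.Str.lower p) ".ps1"
        && !PySem.Str.startswith p pre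
        && !PySem.Set.contains (PySem.Set.ofList (pvAllowedLauncherPaths r)) p)
      = (PySem.Str.endswith (PySem.Str.lower p) ".ps1"
        && !PySem.Str.startswith p pre
        && !(PySem.List.sorted (pvAllowedLauncherPaths r) (fun x => x) false).contains p) := by
  by_cases h : p ∈ pvAllowedLauncherPaths r <;>
    simp [PySem.List.mem_sorted, PySem.Set.mem_ofList, h]

-- ===== VERDICT (by name: the statement is the Claim_ definition above) =====
theorem collect_zip_launcher_paths_py_spec : Claim_equal_collect_zip_launcher_paths_py := by
  intro member_names root_folder_name _
  unfold Spec_collect_zip_launcher_paths_py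
  unfold collect_zip_launcher_paths_py collect_zip_launcher_paths_py_alt
  simp only [pv_raw_eq, pvIsContentFile, pv_counts_getD, pv_range_const]
  refine Prod.ext ?_ ?_
  · exact pv_launchers member_names root_folder_name
  · show PySem.List.sorted _ _ _ = List.filter _ _
    rw [pv_sorted_filter]
    exact List.filter_congr (fun p _ => pv_pred_eq root_folder_name p _)
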